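-- pv_equiv track=rewrite | github.com/TemoTsomaia/portfolio | Education/Epam/Data-Software-Engineering/Python-Practice/data-types-strings-task-3-student-template/tasks/task.py | replacer
-- ===== SOURCE A (Python) =====
-- def replacer(s: str) -> str:
--     x = ""
--     for i in s:
--         match i:
--             case '\"':
--                 x += "\'"
--             case "\'":
--                 x += '\"'
--             case _:
--                 x += i
--     return x
-- ===== SOURCE B (Python) =====
-- def replacer(s: str) -> str:
--     # Three staged whole-string passes: park double quotes on a NUL sentinel
--     # (never present in the printable-ASCII input domain), turn single quotes
--     # into double quotes, then turn the sentinel into single quotes.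
--     return s.replace('"', '\x00').replace("'", '"').replace('\x00', "'")
-- ===== Notes on version B (the rewrite author's own statement) =====
-- stated objective: faster
-- what changed: Replaces the per-character loop with match/append by three staged whole-string str.replace passes using a NUL sentinel to swap the two quote characters.
import Mathlib
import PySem

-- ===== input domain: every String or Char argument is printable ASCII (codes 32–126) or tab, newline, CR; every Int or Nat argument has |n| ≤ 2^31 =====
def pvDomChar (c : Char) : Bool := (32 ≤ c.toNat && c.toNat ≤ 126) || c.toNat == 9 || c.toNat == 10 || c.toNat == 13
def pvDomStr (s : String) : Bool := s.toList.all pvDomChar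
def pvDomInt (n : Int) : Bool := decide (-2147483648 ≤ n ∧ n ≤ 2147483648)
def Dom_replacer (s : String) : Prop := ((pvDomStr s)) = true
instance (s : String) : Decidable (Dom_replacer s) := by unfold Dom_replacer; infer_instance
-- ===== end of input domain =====

-- B swaps the quotes by three staged whole-string str.replace passes through a NUL sentinel
-- (absent from the domain's printable-ASCII input) instead of A's per-character loop with match.

-- ===== PORT A =====
-- each branch of the match appends one character to the accumulator x
def replacer (s : String) : String :=
  String.ofList (s.toList.foldl (fun x i =>
    match i with
    | '"' => x ++ ['\'']
    | '\'' => x ++ ['"']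
    | _ => x ++ [i]) [])

-- ===== PORT B =====
def replacer_alt (s : String) : String :=
  PySem.Str.replace (PySem.Str.replace (PySem.Str.replace s "\"" "\x00") "'" "\"") "\x00" "'"

-- ===== PRECONDITION & SPEC =====
def Spec_replacer (s : String) (out : String) : Prop := out = replacer_alt s
instance (s : String) (out : String) : Decidable (Spec_replacer s out) := by unfold Spec_replacer; infer_instance

-- ===== CLAIM (what is proved, stated in full; the proofs are below) =====
def Claim_equal_replacer : Prop := ∀ (s : String), Dom_replacer s → Spec_replacer s (replacer s)

-- ===== LEMMAS AND PROOFS =====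
-- the per-character quote swap A implements
def swapQuote (c : Char) : Char :=
  match c with
  | '"' => '\''
  | '\'' => '"'
  | _ => c

-- a single-character replace is a map over the characters
theorem replace_go_single (a b : Char) (l : List Char) (fuel : Nat) (acc : List Char)
    (h : l.length ≤ fuel) :
    PySem.Chars.replace.go [a] [b] fuel l acc
      = acc.reverse ++ l.map (fun c => if c = a then b else c) := by
  induction l generalizing fuel acc with
  | nil => cases fuel <;> simp [PySem.Chars.replace.go]
  | cons c t ih =>
    cases fuel with
    | zero => simp at h
    | succ n =>
      simp only [List.length_cons, Nat.succ_le_succ_iff] at h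
      by_cases hc : c = a
      · subst hc
        rw [PySem.Chars.replace.go]
        simp [List.isPrefixOf, ih _ _ h]
      · rw [PySem.Chars.replace.go]
        simp only [List.isPrefixOf, Bool.and_true]
        rw [if_neg (by simpa using fun h' => hc h'.symm)]
        rw [ih _ _ h]
        simp [hc]

theorem replace_single (a b : Char) (l : List Char) :
    PySem.Chars.replace l [a] [b] = l.map (fun c => if c = a then b else c) := by
  unfold PySem.Chars.replace
  simp [replace_go_single a b l l.length [] le_rfl]

theorem foldl_eq_map (l : List Char) :
    (l.foldl (fun x i =>
      match i with
      | '"' => x ++ ['\'']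
      | '\'' => x ++ ['"']
      | _ => x ++ [i]) []) = l.map swapQuote := by
  have h : ∀ (x : List Char) (i : Char),
      (match i with
       | '"' => x ++ ['\'']
       | '\'' => x ++ ['"']
       | _ => x ++ [i]) = x ++ [swapQuote i] := by
    intro x i
    unfold swapQuote
    split <;> rfl
  calc (l.foldl (fun x i =>
      match i with
      | '"' => x ++ ['\'']
      | '\'' => x ++ ['"']
      | _ => x ++ [i]) [])
      = l.foldl (fun x i => x ++ [swapQuote i]) [] := by simp only [h]
    _ = [] ++ l.map swapQuote := PySem.List.foldl_append_singleton_eq_map _ _ _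
    _ = l.map swapQuote := by simp

-- ===== VERDICT (by name: the statement is the Claim_ definition above) =====
theorem replacer_spec : Claim_equal_replacer := by
  intro s hdom
  unfold Spec_replacer replacer replacer_alt
  apply String.ext
  simp only [String.toList_ofList, PySem.Str.replace]
  have e1 : ("\"" : String).toList = ['"'] := rfl
  have e2 : ("'" : String).toList = ['\''] := rfl
  have e3 : ("\x00" : String).toList = ['\x00'] := rfl
  rw [e1, e2, e3, replace_single, replace_single, replace_single, foldl_eq_map]
  simp only [List.map_map]
  apply List.map_congr_left
  intro c hc
  have hd : pvDomChar c = true := by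
    have := (List.all_eq_true.mp hdom) c hc
    simpa using this
  have hnul : c ≠ '\x00' := by
    intro h; subst h; simp [pvDomChar] at hd
  by_cases h1 : c = '"'
  · subst h1; rfl
  · by_cases h2 : c = '\''
    · subst h2; rfl
    · simp only [Function.comp_apply, if_neg h1]
      rw [if_neg h2, if_neg hnul]
      unfold swapQuote
      split
      · exact absurd rfl h1
      · exact absurd rfl h2
      · rfl
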